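-- pv_equiv track=rewrite | github.com/pypi-data/pypi-mirror-329 | packages/PyKubeGrader/PyKubeGrader-0.3.13-py3-none-any.whl/pykubegrader/build/api_notebook_builder.py | add_text_after_double_hash
-- ===== SOURCE A (Python) =====
-- def add_text_after_double_hash(markdown_source, insert_text):
--     """
--     Adds insert_text immediately after the first '##' in the first line that starts with '##'.
--
--     Args:
--     - markdown_source (list of str): The list of lines in the markdown cell.
--     - insert_text (str): The text to be inserted.
--
--     Returns:
--     - list of str: The modified markdown cell content.
--     """
--     modified_source = []
--     inserted = False
--
--     for line in markdown_source:
--         if not inserted and line.startswith("## "):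
--             modified_source.append(f"## {insert_text} {line[3:]}")  # Insert text after '##'
--             inserted = True  # Ensure it only happens once
--         else:
--             modified_source.append(line)
--
--     return modified_source
-- ===== SOURCE B (Python) =====
-- def add_text_after_double_hash(markdown_source, insert_text):
--     """Insert insert_text into the first '## ' line, found by index + slicing."""
--     hit = next(((i, line) for i, line in enumerate(markdown_source)
--                 if line.startswith("## ")), None)
--     if hit is None:
--         return list(markdown_source)
--     idx, line = hit
--     return (markdown_source[:idx]
--             + [f"## {insert_text} {line[3:]}"]
--             + markdown_source[idx + 1:])
-- ===== Notes on version B (the rewrite author's own statement) =====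
-- stated objective: idiomatic
-- what changed: Replaces the per-line inserted-flag accumulation loop by locating the first '## ' line with next(enumerate(...)) and rebuilding the result with two slices around the one rewritten line.
import Mathlib
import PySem

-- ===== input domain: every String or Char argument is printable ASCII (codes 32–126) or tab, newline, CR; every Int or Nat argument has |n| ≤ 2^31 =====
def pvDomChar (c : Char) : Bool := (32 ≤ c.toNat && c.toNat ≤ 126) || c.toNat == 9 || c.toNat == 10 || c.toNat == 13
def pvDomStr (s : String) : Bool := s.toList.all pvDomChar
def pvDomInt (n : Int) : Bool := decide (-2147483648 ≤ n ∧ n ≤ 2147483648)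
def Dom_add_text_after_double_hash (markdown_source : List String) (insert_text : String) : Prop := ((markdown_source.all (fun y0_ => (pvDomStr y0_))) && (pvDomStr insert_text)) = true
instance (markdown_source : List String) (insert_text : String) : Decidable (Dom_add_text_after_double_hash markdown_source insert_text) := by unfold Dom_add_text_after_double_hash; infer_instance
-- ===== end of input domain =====

-- B replaces A's per-line inserted-flag loop by finding the index of the first '## ' line and rebuilding via two slices (idiomatic decomposition; same cost).

-- ===== PORT A =====
-- A-side helper: the loop body of A's for-loop (state = (modified_source, inserted))
def addDhStep (insert_text : String) (acc : List String × Bool) (line : String) : List String × Bool :=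
  if !acc.2 && PySem.Str.startswith line "## " then
    (acc.1 ++ ["## " ++ insert_text ++ " " ++ PySem.Str.slice line (some 3) none], true)
  else
    (acc.1 ++ [line], acc.2)

def add_text_after_double_hash (markdown_source : List String) (insert_text : String) : List String :=
  (markdown_source.foldl (addDhStep insert_text) ([], false)).1

-- ===== PORT B =====
def add_text_after_double_hash_alt (markdown_source : List String) (insert_text : String) : List String :=
  match (PySem.List.enumerate markdown_source 0).find?
      (fun p => PySem.Str.startswith p.2 "## ") with
  | none => markdown_source
  | some (idx, line) =>
      PySem.List.slice markdown_source none (some idx)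
        ++ ["## " ++ insert_text ++ " " ++ PySem.Str.slice line (some 3) none]
        ++ PySem.List.slice markdown_source (some (idx + 1)) none

-- ===== PRECONDITION & SPEC =====
def Spec_add_text_after_double_hash (markdown_source : List String) (insert_text : String) (out : List String) : Prop := out = add_text_after_double_hash_alt markdown_source insert_text
instance (markdown_source : List String) (insert_text : String) (out : List String) : Decidable (Spec_add_text_after_double_hash markdown_source insert_text out) := by unfold Spec_add_text_after_double_hash; infer_instance

-- ===== CLAIM (what is proved, stated in full; the proofs are below) =====
def Claim_equal_add_text_after_double_hash : Prop := ∀ (markdown_source : List String) (insert_text : String), Dom_add_text_after_double_hash markdown_source insert_text → Spec_add_text_after_double_hash markdown_source insert_text (add_text_after_double_hash markdown_source insert_text)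

-- ===== LEMMAS AND PROOFS =====

-- any hit of find? over an enumeration started at a natural index has a natural index
lemma find?_enumerate_nat_index (ms : List String) (p : String → Bool) (s : Nat) (q : Int × String)
    (h : (PySem.List.enumerate ms (s : Int)).find? (fun q => p q.2) = some q) :
    ∃ k : Nat, q.1 = (k : Int) := by
  induction ms generalizing s with
  | nil => simp [PySem.List.enumerate_nil] at h
  | cons l ms ih =>
    rw [PySem.List.enumerate_cons] at h
    by_cases hp : p l
    · simp [List.find?, hp] at h
      exact ⟨s, by simp [← h]⟩
    · simp [List.find?, hp] at h
      have hc : ((s : Int) + 1) = ((s + 1 : Nat) : Int) := by push_cast; ring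
      rw [hc] at h
      exact ih (s + 1) h

-- shifting the enumeration start by one shifts the found index by one
lemma find?_enumerate_shift (ms : List String) (p : String → Bool) (s : Nat) :
    (PySem.List.enumerate ms ((s : Int) + 1)).find? (fun q => p q.2)
      = ((PySem.List.enumerate ms (s : Int)).find? (fun q => p q.2)).map
          (fun q => (q.1 + 1, q.2)) := by
  induction ms generalizing s with
  | nil => simp [PySem.List.enumerate_nil]
  | cons l ms ih =>
    rw [PySem.List.enumerate_cons, PySem.List.enumerate_cons]
    by_cases hp : p l
    · simp [List.find?, hp]
    · simp only [List.find?, hp]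
      have hc : ((s : Int) + 1 + 1) = ((s + 1 : Nat) : Int) + 1 := by push_cast; ring
      rw [hc, ih (s + 1)]
      push_cast
      rfl

-- B's result unfolds like a structural recursion on the line list
lemma alt_cons (l : String) (ms : List String) (it : String) :
    add_text_after_double_hash_alt (l :: ms) it
      = if PySem.Str.startswith l "## " then
          ("## " ++ it ++ " " ++ PySem.Str.slice l (some 3) none) :: ms
        else l :: add_text_after_double_hash_alt ms it := by
  unfold add_text_after_double_hash_alt
  rw [PySem.List.enumerate_cons]
  by_cases hp : PySem.Str.startswith l "## "
  · rw [if_pos hp]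
    simp only [List.find?, hp]
    rw [show (some (0:Int)) = some (((0:Nat):Int)) by norm_num,
        show ((0:Int) + 1) = (((1:Nat)):Int) by norm_num,
        PySem.List.slice_to_natCast, PySem.List.slice_from_natCast]
    simp
  · rw [if_neg hp]
    simp only [List.find?, hp]
    rw [show ((0 : Int) + 1) = ((0 : Nat) : Int) + 1 by norm_num,
        find?_enumerate_shift ms (fun x => PySem.Str.startswith x "## ") 0]
    cases hfind : (PySem.List.enumerate ms ((0 : Nat) : Int)).find?
        (fun q => PySem.Str.startswith q.2 "## ") with
    | none => simp
    | some q =>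
      obtain ⟨k, hk⟩ := find?_enumerate_nat_index ms
        (fun x => PySem.Str.startswith x "## ") 0 q hfind
      obtain ⟨i, line⟩ := q
      simp only [Option.map_some]
      simp only at hk
      subst hk
      have h1 : ((k : Int) + 1) = ((k + 1 : Nat) : Int) := by push_cast; ring
      have h2 : (((k + 1 : Nat) : Int) + 1) = ((k + 2 : Nat) : Int) := by push_cast; ring
      rw [h1, h2, PySem.List.slice_to_natCast, PySem.List.slice_from_natCast,
          PySem.List.slice_to_natCast, PySem.List.slice_from_natCast]
      simp

-- one step of A's loop, in the two relevant states
lemma addDhStep_true (it l : String) (acc : List String) :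
    addDhStep it (acc, true) l = (acc ++ [l], true) := by
  simp [addDhStep]

lemma addDhStep_false (it l : String) (acc : List String) :
    addDhStep it (acc, false) l
      = if PySem.Str.startswith l "## " then
          (acc ++ ["## " ++ it ++ " " ++ PySem.Str.slice l (some 3) none], true)
        else (acc ++ [l], false) := by
  by_cases hp : PySem.Str.startswith l "## " <;> simp [addDhStep, *]

-- A's loop once the flag is set: appends the rest unchanged
lemma loopA_true (it : String) (ms : List String) (acc : List String) :
    (ms.foldl (addDhStep it) (acc, true)).1 = acc ++ ms := by
  induction ms generalizing acc with
  | nil => simp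
  | cons l ms ih => rw [List.foldl_cons, addDhStep_true, ih]; simp

-- A's loop with the flag still clear computes B's value after the prefix
lemma loopA_false (it : String) (ms : List String) (acc : List String) :
    (ms.foldl (addDhStep it) (acc, false)).1
      = acc ++ add_text_after_double_hash_alt ms it := by
  induction ms generalizing acc with
  | nil =>
    simp [add_text_after_double_hash_alt, PySem.List.enumerate_nil]
  | cons l ms ih =>
    rw [alt_cons, List.foldl_cons, addDhStep_false]
    by_cases hp : PySem.Str.startswith l "## "
    · rw [if_pos hp, if_pos hp, loopA_true]; simp
    · rw [if_neg hp, if_neg hp, ih]; simp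

-- ===== VERDICT (by name: the statement is the Claim_ definition above) =====
theorem add_text_after_double_hash_spec : Claim_equal_add_text_after_double_hash := by
  intro ms it _
  unfold Spec_add_text_after_double_hash add_text_after_double_hash
  simpa using loopA_false it ms []
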